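-- pv_equiv track=rewrite | github.com/osirislab/CSAW-CTF-2016-Finals | Reverse/CyberTronix64k/solve.py | unswizzle
-- ===== SOURCE A (Python) =====
-- def unswizzle(data):
--     unswiz = []
--     for dp in data:
--         val = 0
--         val |= (dp & 0b0000000000000011) << 14 # 0 <- 7
--         val |= (dp & 0b1100000000000000) >> 2  # 1 <- 0
--         val |= (dp & 0b0000001100000000) << 2  # 2 <- 3
--         val |= (dp & 0b0011000000000000) >> 4  # 3 <- 1
--         val |= (dp & 0b0000110000000000) >> 4  # 4 <- 2
--         val |= (dp & 0b0000000000001100) << 2  # 5 <- 6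
--         val |= (dp & 0b0000000011000000) >> 4  # 6 <- 4
--         val |= (dp & 0b0000000000110000) >> 4  # 7 <- 5
--         unswiz.append(val)
--     return unswiz
-- ===== SOURCE B (Python) =====
-- # Different decomposition: instead of masking bit-pairs in place and OR-merging
-- # shifted fields, extract each element's eight base-4 digits and reassemble the
-- # result as a base-4 number with a Horner multiply-accumulate loop.
-- _ORDER = (0, 7, 4, 6, 5, 1, 3, 2)   # source pair for each destination pair, MSB first
--
-- def _unswiz(dp):
--     val = 0
--     for s in _ORDER:
--         val = val * 4 + ((dp >> (2 * s)) & 3)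
--     return val
--
-- def unswizzle(data):
--     return [_unswiz(dp) for dp in data]
-- ===== Notes on version B (the rewrite author's own statement) =====
-- stated objective: alternative
-- what changed: B extracts each element's eight 2-bit base-4 digits with shift-and-mask-3 and reassembles the permuted result by a Horner multiply-accumulate loop (val = val*4 + digit), instead of A's eight in-place mask/shift fields OR-merged into an accumulator.
import Mathlib
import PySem

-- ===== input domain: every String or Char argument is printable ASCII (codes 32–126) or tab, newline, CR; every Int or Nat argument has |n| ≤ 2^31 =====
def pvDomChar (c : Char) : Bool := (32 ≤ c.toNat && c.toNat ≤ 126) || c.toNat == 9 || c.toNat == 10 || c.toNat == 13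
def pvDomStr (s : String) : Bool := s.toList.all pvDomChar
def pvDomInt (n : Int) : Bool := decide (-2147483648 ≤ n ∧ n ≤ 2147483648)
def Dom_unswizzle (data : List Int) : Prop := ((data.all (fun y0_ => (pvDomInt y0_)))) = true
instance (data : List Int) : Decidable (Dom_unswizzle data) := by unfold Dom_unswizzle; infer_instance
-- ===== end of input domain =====

-- B builds each output element as a base-4 number: it extracts the eight 2-bit digits of dp
-- and reassembles them in permuted order with a Horner multiply-accumulate loop, instead of
-- A's eight in-place mask/shift fields OR-merged together (objective: alternative; same cost).

-- ===== PORT A =====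
def unswizzle (data : List Int) : List Int :=
  data.foldl (fun unswiz dp =>
    let val : Int := 0
    let val := PySem.Int.bor val ((PySem.Int.band dp 0x0003) <<< (14 : Nat))
    let val := PySem.Int.bor val ((PySem.Int.band dp 0xC000) >>> (2 : Nat))
    let val := PySem.Int.bor val ((PySem.Int.band dp 0x0300) <<< (2 : Nat))
    let val := PySem.Int.bor val ((PySem.Int.band dp 0x3000) >>> (4 : Nat))
    let val := PySem.Int.bor val ((PySem.Int.band dp 0x0C00) >>> (4 : Nat))
    let val := PySem.Int.bor val ((PySem.Int.band dp 0x000C) <<< (2 : Nat))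
    let val := PySem.Int.bor val ((PySem.Int.band dp 0x00C0) >>> (4 : Nat))
    let val := PySem.Int.bor val ((PySem.Int.band dp 0x0030) >>> (4 : Nat))
    unswiz ++ [val]) []

-- ===== PORT B =====
-- the tuple _ORDER of Source B (source pair index for each destination pair, MSB first);
-- the shift amounts 2*s are nonnegative literals, so List Nat is exact here
def pvOrder : List Nat := [0, 7, 4, 6, 5, 1, 3, 2]

-- _unswiz of Source B: Horner loop  val = val*4 + ((dp >> 2*s) & 3)
def pvUnswiz (dp : Int) : Int :=
  pvOrder.foldl (fun (val : Int) (s : Nat) => val * 4 + PySem.Int.band (dp >>> (2 * s)) 3) 0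

def unswizzle_alt (data : List Int) : List Int := data.map pvUnswiz

-- ===== PRECONDITION & SPEC =====
def Spec_unswizzle (data : List Int) (out : List Int) : Prop := out = unswizzle_alt data
instance (data : List Int) (out : List Int) : Decidable (Spec_unswizzle data out) := by unfold Spec_unswizzle; infer_instance

-- ===== CLAIM =====
def Claim_equal_unswizzle : Prop := ∀ (data : List Int), Dom_unswizzle data → Spec_unswizzle data (unswizzle data)

-- ===== LEMMAS AND PROOFS =====

-- bits s..s+1 of m are the bits of (m >>> s) &&& 3, shifted back up
theorem natWindow (m s : ℕ) : m &&& (3 <<< s) = ((m >>> s) &&& 3) <<< s := by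
  apply Nat.eq_of_testBit_eq
  intro i
  rcases Nat.lt_or_ge i s with h | h
  · simp [Nat.testBit_and, Nat.testBit_shiftLeft, Nat.not_le.mpr h]
  · obtain ⟨j, rfl⟩ := Nat.exists_eq_add_of_le h
    simp [Nat.testBit_and, Nat.testBit_shiftLeft, Nat.testBit_shiftRight, Nat.add_comm s j]

-- two's-complement complement commutes with an arithmetic right shift
theorem negShift (x : ℤ) (s : ℕ) (hx : x < 0) : -(x >>> s) - 1 = (↑((-x - 1).toNat >>> s) : ℤ) := by
  have hP : (0:ℤ) < 2 ^ s := by positivity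
  have htn : (((-x - 1).toNat : ℤ)) = -x - 1 := by omega
  rw [Int.shiftRight_eq_div_pow, Nat.shiftRight_eq_div_pow]
  rw [Int.natCast_div, htn]
  push_cast
  set q1 := x / (2:ℤ)^s with hq1
  have h1 := Int.ediv_add_emod x ((2:ℤ)^s)
  have h2 := Int.emod_nonneg x (by positivity : ((2:ℤ)^s) ≠ 0)
  have h3 := Int.emod_lt_of_pos x hP
  have h4 := Int.ediv_add_emod (-x-1) ((2:ℤ)^s)
  have h5 := Int.emod_nonneg (-x-1) (by positivity : ((2:ℤ)^s) ≠ 0)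
  have h6 := Int.emod_lt_of_pos (-x-1) hP
  set q2 := (-x-1) / (2:ℤ)^s with hq2
  set r1 := x % (2:ℤ)^s
  set r2 := (-x-1) % (2:ℤ)^s
  have h7 : (q1 + q2 + 1) * (2:ℤ)^s = (2:ℤ)^s - 1 - r1 - r2 := by ring_nf; linarith
  have h8 : q1 + q2 + 1 = 0 := by
    rcases lt_trichotomy (q1 + q2 + 1) 0 with h | h | h
    · nlinarith
    · exact h
    · nlinarith
  linarith

-- casts of shifts
theorem castShl (a s : ℕ) : ((a <<< s : ℕ) : ℤ) = (a : ℤ) <<< s := by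
  rw [Nat.shiftLeft_eq, Int.shiftLeft_eq]; push_cast; ring

theorem castShr (a s : ℕ) : ((a >>> s : ℕ) : ℤ) = (a : ℤ) >>> s := by
  rw [Nat.shiftRight_eq_div_pow, Int.shiftRight_eq_div_pow, Int.natCast_div]

-- masking a 2-bit window equals extracting the digit and shifting it back up
theorem bandWindow (dp : ℤ) (s : ℕ) :
    PySem.Int.band dp ((3:ℤ) <<< s) = (PySem.Int.band (dp >>> s) 3) <<< s := by
  have hmask : ((3:ℤ) <<< s) = (((3 <<< s : ℕ)) : ℤ) := (castShl 3 s).symm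
  have hmnn : (0:ℤ) ≤ (3:ℤ) <<< s := by rw [Int.shiftLeft_eq]; positivity
  rcases le_or_gt 0 dp with hdp | hdp
  · -- dp ≥ 0: both sides reduce to the Nat window fact
    have hsh : (0:ℤ) ≤ dp >>> s := by
      rw [Int.shiftRight_eq_div_pow]; exact Int.ediv_nonneg hdp (by positivity)
    have htn : (dp >>> s).toNat = dp.toNat >>> s := by
      have : ((dp.toNat >>> s : ℕ) : ℤ) = dp >>> s := by
        rw [castShr]; congr 1; omega
      omega
    simp only [PySem.Int.band, if_pos hdp, if_pos hsh, if_pos hmnn,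
      if_pos (by norm_num : (0:ℤ) ≤ 3)]
    rw [htn, hmask]
    have h3 : ((3:ℤ)).toNat = 3 := rfl
    have hm : (((3 <<< s : ℕ) : ℤ)).toNat = 3 <<< s := by omega
    rw [hm, h3, natWindow, ← castShl]
  · -- dp < 0: both branches read the complement's bits
    have hsh : dp >>> s < 0 := by
      rw [Int.shiftRight_eq_div_pow]
      exact Int.ediv_neg_of_neg_of_pos hdp (by positivity)
    simp only [PySem.Int.band, if_neg (by omega : ¬ (0:ℤ) ≤ dp),
      if_neg (by omega : ¬ (0:ℤ) ≤ dp >>> s), if_pos hmnn,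
      if_pos (by norm_num : (0:ℤ) ≤ 3)]
    have hk : (-(dp >>> s) - 1).toNat = (-dp - 1).toNat >>> s := by
      have := negShift dp s hdp
      omega
    rw [hk, hmask]
    have hm : (((3 <<< s : ℕ) : ℤ)).toNat = 3 <<< s := by omega
    have h3 : ((3:ℤ)).toNat = 3 := rfl
    rw [hm, h3]
    set k := (-dp - 1).toNat
    have hand : (3 <<< s) &&& k = ((k >>> s) &&& 3) <<< s := by
      rw [Nat.and_comm]; exact natWindow k s
    rw [hand]
    have hle : (k >>> s) &&& 3 ≤ 3 := Nat.and_le_right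
    have hcomm : (3:ℕ) &&& (k >>> s) = (k >>> s) &&& 3 := Nat.and_comm ..
    rw [hcomm, Int.shiftLeft_eq]
    rw [Nat.shiftLeft_eq, Nat.shiftLeft_eq, ← Nat.sub_mul]
    push_cast [hle]
    ring

-- a 2-bit digit is between 0 and 3
theorem band3 (x : ℤ) : 0 ≤ PySem.Int.band x 3 ∧ PySem.Int.band x 3 < 4 := by
  have h1 : x.toNat &&& 3 ≤ 3 := Nat.and_le_right
  have h2 : (3:ℕ) &&& (-x - 1).toNat ≤ 3 := Nat.and_le_left
  have h3 : ((3:ℤ)).toNat = 3 := rfl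
  simp only [PySem.Int.band, h3]
  split_ifs with h h' h'
  · omega
  · norm_num at h'
  · omega
  · norm_num at h'

-- OR of a multiple of 2^n with a value below 2^n is addition
theorem orAdd (a b c : ℤ) (n : ℕ) (hc : a = 2 ^ n * c) (hc0 : 0 ≤ c) (hb : 0 ≤ b)
    (hlt : b < 2 ^ n) : PySem.Int.bor a b = a + b := by
  have hP : (0:ℤ) < 2 ^ n := by positivity
  have ha : 0 ≤ a := by rw [hc]; exact mul_nonneg (by positivity) hc0
  have hatn : a.toNat = 2 ^ n * c.toNat := by
    have h : ((2 ^ n * c.toNat : ℕ) : ℤ) = a := by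
      rw [hc]; push_cast [Int.toNat_of_nonneg hc0]; ring
    omega
  have hbtn : b.toNat < 2 ^ n := by
    have h : ((2 ^ n : ℕ) : ℤ) = 2 ^ n := by push_cast; ring
    omega
  simp only [PySem.Int.bor, if_pos ha, if_pos hb]
  rw [hatn, ← Nat.two_pow_add_eq_or_of_lt hbtn]
  push_cast [Int.toNat_of_nonneg hc0, Int.toNat_of_nonneg hb]
  rw [hc]

-- the per-element values agree
theorem elem_eq (dp : ℤ) :
    PySem.Int.bor (PySem.Int.bor (PySem.Int.bor (PySem.Int.bor (PySem.Int.bor (PySem.Int.bor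
      (PySem.Int.bor (PySem.Int.bor 0
        ((PySem.Int.band dp 0x0003) <<< (14 : Nat)))
        ((PySem.Int.band dp 0xC000) >>> (2 : Nat)))
        ((PySem.Int.band dp 0x0300) <<< (2 : Nat)))
        ((PySem.Int.band dp 0x3000) >>> (4 : Nat)))
        ((PySem.Int.band dp 0x0C00) >>> (4 : Nat)))
        ((PySem.Int.band dp 0x000C) <<< (2 : Nat)))
        ((PySem.Int.band dp 0x00C0) >>> (4 : Nat)))
        ((PySem.Int.band dp 0x0030) >>> (4 : Nat)) = pvUnswiz dp := by
  have m14 : (0xC000 : ℤ) = (3:ℤ) <<< (14:ℕ) := by decide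
  have m8 : (0x0300 : ℤ) = (3:ℤ) <<< (8:ℕ) := by decide
  have m12 : (0x3000 : ℤ) = (3:ℤ) <<< (12:ℕ) := by decide
  have m10 : (0x0C00 : ℤ) = (3:ℤ) <<< (10:ℕ) := by decide
  have m2 : (0x000C : ℤ) = (3:ℤ) <<< (2:ℕ) := by decide
  have m6 : (0x00C0 : ℤ) = (3:ℤ) <<< (6:ℕ) := by decide
  have m4 : (0x0030 : ℤ) = (3:ℤ) <<< (4:ℕ) := by decide
  rw [m14, m8, m12, m10, m2, m6, m4,
    bandWindow dp 14, bandWindow dp 8, bandWindow dp 12, bandWindow dp 10,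
    bandWindow dp 2, bandWindow dp 6, bandWindow dp 4]
  simp only [pvUnswiz, pvOrder, List.foldl_cons, List.foldl_nil]
  norm_num [Int.shiftRight_zero]
  set E0 := PySem.Int.band dp 3 with hE0d
  set E14 := PySem.Int.band (dp >>> (14:ℕ)) 3 with hE14d
  set E8 := PySem.Int.band (dp >>> (8:ℕ)) 3 with hE8d
  set E12 := PySem.Int.band (dp >>> (12:ℕ)) 3 with hE12d
  set E10 := PySem.Int.band (dp >>> (10:ℕ)) 3 with hE10d
  set E2 := PySem.Int.band (dp >>> (2:ℕ)) 3 with hE2d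
  set E6 := PySem.Int.band (dp >>> (6:ℕ)) 3 with hE6d
  set E4 := PySem.Int.band (dp >>> (4:ℕ)) 3 with hE4d
  obtain ⟨b00, b01⟩ := band3 dp
  obtain ⟨b140, b141⟩ := band3 (dp >>> (14:ℕ))
  obtain ⟨b80, b81⟩ := band3 (dp >>> (8:ℕ))
  obtain ⟨b120, b121⟩ := band3 (dp >>> (12:ℕ))
  obtain ⟨b100, b101⟩ := band3 (dp >>> (10:ℕ))
  obtain ⟨b20, b21⟩ := band3 (dp >>> (2:ℕ))
  obtain ⟨b60, b61⟩ := band3 (dp >>> (6:ℕ))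
  obtain ⟨b40, b41⟩ := band3 (dp >>> (4:ℕ))
  rw [← hE0d, ← hE14d, ← hE8d, ← hE12d, ← hE10d, ← hE2d, ← hE6d, ← hE4d] at *
  simp only [Int.shiftLeft_eq, Int.shiftRight_eq_div_pow]
  norm_num
  have t6 : E14 * 16384 / 4 = E14 * 4096 := by omega
  have t4 : E12 * 4096 / 16 = E12 * 256 := by omega
  have t3 : E10 * 1024 / 16 = E10 * 64 := by omega
  have t1 : E6 * 64 / 16 = E6 * 4 := by omega
  rw [t6, t4, t3, t1]
  rw [orAdd 0 (E0 * 16384) 0 16 (by norm_num) (by omega) (by omega) (by norm_num; omega)]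
  rw [orAdd (0 + E0 * 16384) (E14 * 4096) E0 14 (by ring) (by omega) (by omega)
    (by norm_num; omega)]
  rw [orAdd (0 + E0 * 16384 + E14 * 4096) (E8 * 256 * 4) (E0 * 4 + E14) 12
    (by ring) (by omega) (by omega) (by norm_num; omega)]
  rw [orAdd (0 + E0 * 16384 + E14 * 4096 + E8 * 256 * 4) (E12 * 256)
    (E0 * 16 + E14 * 4 + E8) 10 (by ring) (by omega) (by omega) (by norm_num; omega)]
  rw [orAdd (0 + E0 * 16384 + E14 * 4096 + E8 * 256 * 4 + E12 * 256) (E10 * 64)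
    (E0 * 64 + E14 * 16 + E8 * 4 + E12) 8 (by ring) (by omega) (by omega)
    (by norm_num; omega)]
  rw [orAdd (0 + E0 * 16384 + E14 * 4096 + E8 * 256 * 4 + E12 * 256 + E10 * 64) (E2 * 4 * 4)
    (E0 * 256 + E14 * 64 + E8 * 16 + E12 * 4 + E10) 6 (by ring) (by omega) (by omega)
    (by norm_num; omega)]
  rw [orAdd (0 + E0 * 16384 + E14 * 4096 + E8 * 256 * 4 + E12 * 256 + E10 * 64 + E2 * 4 * 4)
    (E6 * 4) (E0 * 1024 + E14 * 256 + E8 * 64 + E12 * 16 + E10 * 4 + E2) 4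
    (by ring) (by omega) (by omega) (by norm_num; omega)]
  rw [orAdd (0 + E0 * 16384 + E14 * 4096 + E8 * 256 * 4 + E12 * 256 + E10 * 64 + E2 * 4 * 4
      + E6 * 4) E4
    (E0 * 4096 + E14 * 1024 + E8 * 256 + E12 * 64 + E10 * 16 + E2 * 4 + E6) 2
    (by ring) (by omega) (by omega) (by norm_num; omega)]
  ring

-- ===== VERDICT =====
theorem unswizzle_spec : Claim_equal_unswizzle := by
  intro data _
  unfold Spec_unswizzle unswizzle unswizzle_alt
  rw [PySem.List.foldl_append_singleton_eq_map]
  exact List.map_congr_left (fun dp _ => elem_eq dp)
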